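-- pv_equiv track=rewrite | github.com/Soucieux/COMP-6341-Project | Project/drawing.py | spacing_y_direction
-- ===== SOURCE A (Python) =====
-- def spacing_y_direction(pixel_value):
--     density_y = 10
--     previous_density_y = 10
--     # set the density of vertical lines
--     for i in range(0, 255, 30):
--         if i <= pixel_value < i + 30:
--             previous_density_y = density_y
--             density_y = 2 * ((i // 30) + 1)
--             break
--     return density_y, previous_density_y
-- ===== SOURCE B (Python) =====
-- def spacing_y_direction(pixel_value):
--     # closed form: floor-division picks the bucket directly on the covered interval
--     if 0 <= pixel_value < 270:
--         return 2 * (int(pixel_value // 30) + 1), 10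
--     return 10, 10
-- ===== Notes on version B (the rewrite author's own statement) =====
-- stated objective: simpler
-- what changed: Replaces the linear scan over the nine 30-wide buckets with a single closed-form floor-division that computes the bucket directly, guarded by the covered interval.
import Mathlib
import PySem

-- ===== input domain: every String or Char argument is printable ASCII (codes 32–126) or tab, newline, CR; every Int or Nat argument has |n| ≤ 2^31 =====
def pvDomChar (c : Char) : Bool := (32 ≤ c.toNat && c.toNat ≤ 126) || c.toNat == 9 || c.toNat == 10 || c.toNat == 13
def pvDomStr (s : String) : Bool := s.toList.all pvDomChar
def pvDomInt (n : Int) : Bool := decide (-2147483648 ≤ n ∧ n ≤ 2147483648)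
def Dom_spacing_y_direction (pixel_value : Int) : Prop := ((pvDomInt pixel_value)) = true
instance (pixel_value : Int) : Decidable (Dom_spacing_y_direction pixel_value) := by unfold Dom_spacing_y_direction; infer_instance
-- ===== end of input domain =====

-- B replaces A's bucket-scan loop with a closed-form floor-division on the covered interval: simpler, same values.


-- ===== PORT A =====
-- A's for-loop with break: structural recursion over the range list, carrying (density_y, previous_density_y)
def pvLoopA (pixel_value : Int) : List Int → Int → Int → Int × Int
  | [], d, p => (d, p)
  | i :: rest, d, p =>
    if i ≤ pixel_value ∧ pixel_value < i + 30 then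
      (2 * (PySem.Int.floordiv i 30 + 1), d)
    else pvLoopA pixel_value rest d p

def spacing_y_direction (pixel_value : Int) : Int × Int :=
  pvLoopA pixel_value (PySem.List.pyRange 0 255 30) 10 10

-- ===== PORT B =====
def spacing_y_direction_alt (pixel_value : Int) : Int × Int :=
  if 0 ≤ pixel_value ∧ pixel_value < 270 then
    (2 * (PySem.Int.floordiv pixel_value 30 + 1), 10)
  else (10, 10)

-- ===== PRECONDITION & SPEC =====
def Spec_spacing_y_direction (pixel_value : Int) (out : Int × Int) : Prop := out = spacing_y_direction_alt pixel_value
instance (pixel_value : Int) (out : Int × Int) : Decidable (Spec_spacing_y_direction pixel_value out) := by unfold Spec_spacing_y_direction; infer_instance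

-- ===== CLAIM (what is proved, stated in full; the proofs are below) =====
def Claim_equal_spacing_y_direction : Prop := ∀ (pixel_value : Int), Dom_spacing_y_direction pixel_value → Spec_spacing_y_direction pixel_value (spacing_y_direction pixel_value)

-- ===== LEMMAS AND PROOFS =====
theorem pvRange_eval : PySem.List.pyRange 0 255 30 = [0, 30, 60, 90, 120, 150, 180, 210, 240] := by
  decide

-- ===== VERDICT (by name: the statement is the Claim_ definition above) =====
theorem spacing_y_direction_spec : Claim_equal_spacing_y_direction := by
  intro pv _
  unfold Spec_spacing_y_direction spacing_y_direction spacing_y_direction_alt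
  rw [pvRange_eval]
  simp only [pvLoopA, PySem.Int.floordiv_eq_ediv_of_pos (a := pv) (b := 30) (by norm_num)]
  split_ifs <;> norm_num <;> omega
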